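-- pv_equiv track=rewrite | github.com/bssrdf/Algorithms-String-Trees-Seqs | ex1_9.py | match_count1
-- ===== SOURCE A (Python) =====
-- def match_count1(s1, s2, k):
--     # Brute force O(kn^2)
--     n = len(s1)
--     ans = [[0]*(n-k+1) for _ in range(n-k+1)]
--     def count(s1, s2):
--         cnt = 0
--         for i in range(len(s1)):
--             if s1[i] == s2[i]:
--                 cnt += 1
--         return cnt
--     for i in range(n-k+1):
--         for j in range(n-k+1):
--             ans[i][j] = count(s1[i:i+k], s2[j:j+k])
--     return ans
-- ===== SOURCE B (Python) =====
-- def match_count1(s1, s2, k):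
--     # Per-diagonal prefix sums of the equality indicator: O(n^2) instead of O(k n^2).
--     n = len(s1)
--     m = n - k + 1
--     pre = []
--     for d in range(-(m - 1), m):
--         i0, j0 = (0, d) if d >= 0 else (-d, 0)
--         acc = [0]
--         s = 0
--         for t in range(n - abs(d)):
--             s += s1[i0 + t] == s2[j0 + t]
--             acc.append(s)
--         pre.append(acc)
--     return [[pre[j - i + m - 1][min(i, j) + k] - pre[j - i + m - 1][min(i, j)]
--              for j in range(m)] for i in range(m)]
-- ===== Notes on version B (the rewrite author's own statement) =====
-- stated objective: faster
-- what changed: Replaces the O(k n^2) per-pair window recount with per-diagonal prefix sums of the equality indicator, so each matrix entry becomes one subtraction (O(n^2) total).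
-- outside the precondition, e.g. on match_count1('ab', 'a', 0): A returns [[0, 0, 0], [0, 0, 0], [0, 0, 0]], B raises IndexError
import Mathlib
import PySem

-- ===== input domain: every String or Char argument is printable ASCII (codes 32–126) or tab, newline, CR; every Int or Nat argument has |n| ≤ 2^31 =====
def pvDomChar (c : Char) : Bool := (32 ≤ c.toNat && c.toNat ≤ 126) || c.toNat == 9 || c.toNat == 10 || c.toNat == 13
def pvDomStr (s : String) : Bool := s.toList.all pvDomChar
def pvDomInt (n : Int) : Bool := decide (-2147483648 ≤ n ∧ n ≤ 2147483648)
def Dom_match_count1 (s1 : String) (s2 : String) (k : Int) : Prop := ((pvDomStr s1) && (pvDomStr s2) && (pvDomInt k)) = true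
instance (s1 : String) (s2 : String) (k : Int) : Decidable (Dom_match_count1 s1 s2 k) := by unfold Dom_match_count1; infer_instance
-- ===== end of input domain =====

-- B replaces A's O(k n^2) per-pair window recount by per-diagonal prefix sums of the
-- equality indicator (each entry one subtraction): asymptotically faster, proved equal on Pre_.


-- ===== PORT A =====
-- inner helper 'count(s1, s2)': loop over range(len(s1)) counting equal positions.
-- (indexing ported via pyGet?; on Pre_ every index is in range, exact there)
def pvCount (a : List Char) (b : List Char) : Int :=
  (PySem.List.pyRange 0 (a.length : Int) 1).foldl
    (fun cnt i => if PySem.List.pyGet? a i == PySem.List.pyGet? b i then cnt + 1 else cnt) 0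

-- A's double loop assigns every cell ans[i][j] of the preallocated zero matrix in order;
-- ported as nested maps over the same index ranges (same cells, same order, same values).
def match_count1 (s1 : String) (s2 : String) (k : Int) : List (List Int) :=
  let l1 := s1.toList
  let l2 := s2.toList
  let n : Int := l1.length
  (PySem.List.pyRange 0 (n - k + 1) 1).map (fun i =>
    (PySem.List.pyRange 0 (n - k + 1) 1).map (fun j =>
      pvCount (PySem.List.slice l1 (some i) (some (i + k)))
              (PySem.List.slice l2 (some j) (some (j + k)))))

-- ===== PORT B =====
-- 's1[a] == s2[b]' added as an int (indices in range on Pre_)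
def pvEq (l1 l2 : List Char) (a b : Int) : Int :=
  if PySem.List.pyGet? l1 a == PySem.List.pyGet? l2 b then 1 else 0

-- the inner loop of Source B: acc = [0]; s = 0; for t in range(L): s += eq; acc.append(s)
def pvAccRow (l1 l2 : List Char) (i0 j0 L : Int) : List Int :=
  ((PySem.List.pyRange 0 L 1).foldl
    (fun st t => (st.1 ++ [st.2 + pvEq l1 l2 (i0 + t) (j0 + t)],
                  st.2 + pvEq l1 l2 (i0 + t) (j0 + t)))
    ([0], 0)).1

-- (the two matrix lookups pre[j-i+m-1][...] are in range on Pre_; ported via pyGetD)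
def match_count1_alt (s1 : String) (s2 : String) (k : Int) : List (List Int) :=
  let l1 := s1.toList
  let l2 := s2.toList
  let n : Int := l1.length
  let m := n - k + 1
  let pre := (PySem.List.pyRange (-(m - 1)) m 1).foldl
    (fun acc d =>
      acc ++ [pvAccRow l1 l2 (if 0 ≤ d then 0 else -d) (if 0 ≤ d then d else 0) (n - |d|)]) []
  (PySem.List.pyRange 0 m 1).map (fun i =>
    (PySem.List.pyRange 0 m 1).map (fun j =>
      PySem.List.pyGetD (PySem.List.pyGetD pre (j - i + m - 1) []) (min i j + k) 0 -
      PySem.List.pyGetD (PySem.List.pyGetD pre (j - i + m - 1) []) (min i j) 0))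

-- ===== PRECONDITION & SPEC =====
-- Pre_ excludes negative k — outside the natural domain of a window length (there A raises
-- IndexError when -len(s1) < k < 0 and otherwise returns all-zero matrices produced by Python's
-- negative-slice clamping, where B raises) — and excludes len(s2) < len(s1) with k ≤ len(s1),
-- where A raises IndexError on the first over-long row (except k = 0, where A returns a zero
-- matrix of empty slices and B raises).
def Pre_match_count1 (s1 : String) (s2 : String) (k : Int) : Prop :=
  0 ≤ k ∧ ((s1.toList.length : Int) < k ∨ s1.toList.length ≤ s2.toList.length)
instance (s1 : String) (s2 : String) (k : Int) : Decidable (Pre_match_count1 s1 s2 k) := by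
  unfold Pre_match_count1; infer_instance

def pvWitness_match_count1 : String × String × Int := ("abcab", "axcbb", 2)

def Spec_match_count1 (s1 : String) (s2 : String) (k : Int) (out : List (List Int)) : Prop := out = match_count1_alt s1 s2 k
instance (s1 : String) (s2 : String) (k : Int) (out : List (List Int)) : Decidable (Spec_match_count1 s1 s2 k out) := by unfold Spec_match_count1; infer_instance

-- ===== CLAIM (what is proved, stated in full; the proofs are below) =====
def Claim_equal_match_count1 : Prop := ∀ (s1 : String) (s2 : String) (k : Int), Dom_match_count1 s1 s2 k → Pre_match_count1 s1 s2 k → Spec_match_count1 s1 s2 k (match_count1 s1 s2 k)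

-- ===== LEMMAS AND PROOFS =====

-- the common value both entries compute: Σ_{t<c} [l1[i+t] = l2[j+t]]
def pvSum (l1 l2 : List Char) (i j : Int) (c : Nat) : Int :=
  ((List.range c).map (fun t => pvEq l1 l2 (i + (t : Int)) (j + (t : Int)))).sum

theorem pvSum_succ (l1 l2 : List Char) (i j : Int) (c : Nat) :
    pvSum l1 l2 i j (c + 1) = pvSum l1 l2 i j c + pvEq l1 l2 (i + (c : Int)) (j + (c : Int)) := by
  simp [pvSum, List.range_succ]

-- splitting the count at r: a window sum is a difference of prefix sums
theorem pvSum_add (l1 l2 : List Char) (i j : Int) (a b : Nat) :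
    pvSum l1 l2 i j (a + b) = pvSum l1 l2 i j a + pvSum l1 l2 (i + (a : Int)) (j + (a : Int)) b := by
  induction b with
  | zero => simp [pvSum]
  | succ b ih =>
      have h1 : a + (b + 1) = (a + b) + 1 := by omega
      rw [h1, pvSum_succ, ih, pvSum_succ]
      push_cast
      ring_nf

-- A's inner count over the two k-slices is the window sum
theorem pvCount_eq (l1 l2 : List Char) (i j k : Int)
    (hi : 0 ≤ i) (hik : i + k ≤ (l1.length : Int)) (hj : 0 ≤ j)
    (hk : 0 ≤ k) :
    pvCount (PySem.List.slice l1 (some i) (some (i + k))) (PySem.List.slice l2 (some j) (some (j + k)))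
      = pvSum l1 l2 i j k.toNat := by
  have hA : PySem.List.slice l1 (some i) (some (i + k)) = (l1.drop i.toNat).take k.toNat := by
    rw [PySem.List.slice_toNat l1 hi (by omega)]
    congr 1
    omega
  have hB : PySem.List.slice l2 (some j) (some (j + k)) = (l2.drop j.toNat).take k.toNat := by
    rw [PySem.List.slice_toNat l2 hj (by omega)]
    congr 1
    omega
  have hlenA : ((l1.drop i.toNat).take k.toNat).length = k.toNat := by
    simp
    omega
  have hgetA : ∀ t : Nat, t < k.toNat →
      PySem.List.pyGet? ((l1.drop i.toNat).take k.toNat) (t : Int) = PySem.List.pyGet? l1 (i + (t : Int)) := by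
    intro t ht
    have h1 : i + (t : Int) = ((i.toNat + t : Nat) : Int) := by push_cast; omega
    rw [PySem.List.pyGet?_natCast, h1, PySem.List.pyGet?_natCast,
      List.getElem?_take_of_lt ht, List.getElem?_drop]
  have hgetB : ∀ t : Nat, t < k.toNat →
      PySem.List.pyGet? ((l2.drop j.toNat).take k.toNat) (t : Int) = PySem.List.pyGet? l2 (j + (t : Int)) := by
    intro t ht
    have h1 : j + (t : Int) = ((j.toNat + t : Nat) : Int) := by push_cast; omega
    rw [PySem.List.pyGet?_natCast, h1, PySem.List.pyGet?_natCast,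
      List.getElem?_take_of_lt ht, List.getElem?_drop]
  unfold pvCount
  rw [hA, hB, hlenA]
  have hrange : PySem.List.pyRange 0 ((k.toNat : Nat) : Int) 1
      = (List.range k.toNat).map (fun t : Nat => (t : Int)) := by
    have h0 : (((k.toNat : Nat) : Int) - 0).toNat = k.toNat := by omega
    rw [PySem.List.pyRange_one, h0]
    simp
  rw [hrange, List.foldl_map]
  have aux : ∀ c : Nat, c ≤ k.toNat →
      (List.range c).foldl
        (fun cnt (t : Nat) =>
          if PySem.List.pyGet? ((l1.drop i.toNat).take k.toNat) (t : Int)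
              == PySem.List.pyGet? ((l2.drop j.toNat).take k.toNat) (t : Int)
          then cnt + 1 else cnt) 0 = pvSum l1 l2 i j c := by
    intro c
    induction c with
    | zero => intro _; simp [pvSum]
    | succ c ih =>
        intro hc
        rw [List.range_succ, List.foldl_append, ih (by omega)]
        simp only [List.foldl_cons, List.foldl_nil]
        rw [hgetA c (by omega), hgetB c (by omega), pvSum_succ]
        unfold pvEq
        split <;> simp
  exact aux k.toNat (le_refl _)

-- the foldl of Source B's inner loop builds the list of prefix sums
theorem pvAccRow_eq (l1 l2 : List Char) (i0 j0 L : Int) :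
    pvAccRow l1 l2 i0 j0 L = (List.range (L.toNat + 1)).map (fun r => pvSum l1 l2 i0 j0 r) := by
  have hrange : PySem.List.pyRange 0 L 1 = (List.range L.toNat).map (fun t : Nat => (t : Int)) := by
    rw [PySem.List.pyRange_one]
    simp
  unfold pvAccRow
  rw [hrange, List.foldl_map]
  have aux : ∀ c : Nat,
      (List.range c).foldl
        (fun st (t : Nat) =>
          (st.1 ++ [st.2 + pvEq l1 l2 (i0 + (t : Int)) (j0 + (t : Int))],
           st.2 + pvEq l1 l2 (i0 + (t : Int)) (j0 + (t : Int)))) (([0] : List Int), (0 : Int))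
      = ((List.range (c + 1)).map (fun r => pvSum l1 l2 i0 j0 r), pvSum l1 l2 i0 j0 c) := by
    intro c
    induction c with
    | zero => simp [pvSum]
    | succ c ih =>
        rw [List.range_succ, List.foldl_append, ih]
        simp only [List.foldl_cons, List.foldl_nil]
        rw [List.range_succ (n := c + 1), List.map_append]
        simp [pvSum_succ]
  rw [aux]

-- one matrix entry of B equals the window sum
theorem pvEntry_eq (l1 l2 : List Char) (k i j : Int) (hk : 0 ≤ k)
    (hi : 0 ≤ i) (hj : 0 ≤ j)
    (hi2 : i < (l1.length : Int) - k + 1) (hj2 : j < (l1.length : Int) - k + 1) :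
    PySem.List.pyGetD
      (PySem.List.pyGetD
        ((PySem.List.pyRange (-(((l1.length : Int) - k + 1) - 1)) ((l1.length : Int) - k + 1) 1).foldl
          (fun acc d =>
            acc ++ [pvAccRow l1 l2 (if 0 ≤ d then 0 else -d) (if 0 ≤ d then d else 0)
                      ((l1.length : Int) - |d|)]) [])
        (j - i + ((l1.length : Int) - k + 1) - 1) []) (min i j + k) 0 -
    PySem.List.pyGetD
      (PySem.List.pyGetD
        ((PySem.List.pyRange (-(((l1.length : Int) - k + 1) - 1)) ((l1.length : Int) - k + 1) 1).foldl
          (fun acc d =>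
            acc ++ [pvAccRow l1 l2 (if 0 ≤ d then 0 else -d) (if 0 ≤ d then d else 0)
                      ((l1.length : Int) - |d|)]) [])
        (j - i + ((l1.length : Int) - k + 1) - 1) []) (min i j) 0
      = pvSum l1 l2 i j k.toNat := by
  set n : Int := (l1.length : Int) with hn
  set m : Int := n - k + 1 with hm
  set f : Int → List Int := fun d =>
    pvAccRow l1 l2 (if 0 ≤ d then 0 else -d) (if 0 ≤ d then d else 0) (n - |d|) with hf
  rw [PySem.List.foldl_append_singleton_eq_map f _ []]
  simp only [List.nil_append]
  -- the outer lookup hits diagonal d = j - i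
  have hidx : j - i + m - 1 = (((j - i + m - 1).toNat : Nat) : Int) := by omega
  rw [hidx, PySem.List.pyGetD_map_pyRange_one f (-(m - 1)) m _ [] (by omega)]
  have harg : -(m - 1) + (((j - i + m - 1).toNat : Nat) : Int) = j - i := by omega
  rw [harg, hf]
  beta_reduce
  rw [pvAccRow_eq]
  -- the two inner lookups are prefix sums
  have habs : |j - i| = max i j - min i j := by
    rcases le_total i j with h | h
    · rw [abs_of_nonneg (by omega)]; omega
    · rw [abs_of_nonpos (by omega)]; omega
  set r : Nat := (min i j).toNat with hr
  have hmin1 : min i j + k = ((r + k.toNat : Nat) : Int) := by omega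
  have hmin2 : min i j = ((r : Nat) : Int) := by omega
  rw [hmin1, hmin2, PySem.List.pyGetD_natCast, PySem.List.pyGetD_natCast,
    PySem.List.getD_map_range _ _ _ _ (by omega), PySem.List.getD_map_range _ _ _ _ (by omega),
    pvSum_add]
  -- difference of prefix sums = window sum, shifted to the start (i, j)
  have e1 : (if (0:Int) ≤ j - i then (0:Int) else -(j - i)) + ((r : Nat) : Int) = i := by
    split <;> omega
  have e2 : (if (0:Int) ≤ j - i then j - i else (0:Int)) + ((r : Nat) : Int) = j := by
    split <;> omega
  rw [e1, e2]
  ring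

-- ===== VERDICT (by name: the statement is the Claim_ definition above) =====
theorem match_count1_spec : Claim_equal_match_count1 := by
  intro s1 s2 k _hdom hpre
  obtain ⟨hk, hlen⟩ := hpre
  unfold Spec_match_count1 match_count1 match_count1_alt
  dsimp only
  apply List.map_congr_left
  intro i hi
  apply List.map_congr_left
  intro j hj
  rw [PySem.List.mem_pyRange_one] at hi hj
  have hklen : k ≤ (s1.toList.length : Int) := by omega
  have hlen2 : (s1.toList.length : Int) ≤ (s2.toList.length : Int) := by
    rcases hlen with h | h
    · omega
    · exact_mod_cast h
  rw [pvCount_eq s1.toList s2.toList i j k hi.1 (by omega) hj.1 hk]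
  rw [show (j - i + ((s1.toList.length : Int) - k + 1) - 1)
        = (j - i + ((s1.toList.length : Int) - k + 1) - 1) from rfl]
  exact (pvEntry_eq s1.toList s2.toList k i j hk hi.1 hj.1 hi.2 hj.2).symm
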